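-- pv_equiv track=rewrite | github.com/liupengsay/PyIsTheBestLang | src/dp/state_dp/problem.py | lc_1723
-- ===== SOURCE A (Python) =====
-- from typing import List
--
-- def lc_1723(jobs: List[int], k: int) -> int:
--     """
--     url: https://leetcode.cn/problems/find-minimum-time-to-finish-all-jobs/
--     tag: bit_operation|minimum_maximum|brute_force|classical|sub_set|refresh_table
--     """
--     n = len(jobs)
--     ind = {1 << i: i for i in range(n)}
--     cost = [0] * (1 << n)
--     for i in range(1, 1 << n):
--         cost[i] = cost[i & (i - 1)] + jobs[ind[i & (-i)]]
--     pre = cost[:]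
--     cur = cost[:]
--     for _ in range(k - 1):
--         for i in range(1, 1 << n):
--             sub = i
--             while sub:
--                 if cost[sub] < cur[i] and pre[i ^ sub] < cur[i]:
--                     cur[i] = max(pre[i ^ sub], cost[sub])
--                 sub = (sub - 1) & i
--         for i in range(1 << n):
--             pre[i] = cur[i]
--     return pre[-1]
-- ===== SOURCE B (Python) =====
-- def lc_1723(jobs, k):
--     # Binary search on the answer over the sorted distinct subset costs,
--     # with a subset-DP feasibility check (min number of workers under a limit).
--     if k <= 1:
--         # fewer than two workers: the single worker takes every job
--         return sum(jobs)
--     n = len(jobs)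
--     # cost of every subset, built by doubling
--     cost = [0]
--     for x in jobs:
--         cost = cost + [c + x for c in cost]
--     full = (1 << n) - 1
--
--     def workers_needed(limit):
--         inf = float("inf")
--         dp = [0] + [inf] * full
--         for m in range(1, full + 1):
--             best = inf
--             s = m
--             while s:
--                 if cost[s] <= limit and dp[m ^ s] + 1 < best:
--                     best = dp[m ^ s] + 1
--                 s = (s - 1) & m
--             dp[m] = best
--         return dp[full]
--
--     cand = sorted(set(cost))
--     lo, hi = 0, len(cand) - 1
--     while lo < hi:
--         mid = (lo + hi) // 2
--         if workers_needed(cand[mid]) <= k: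
--             hi = mid
--         else:
--             lo = mid + 1
--     return cand[lo]
-- ===== Notes on version B (the rewrite author's own statement) =====
-- stated objective: alternative
-- what changed: Replaces the k-layer min-max refresh DP (k-1 sweeps of submask relaxation) by a binary search over the sorted distinct subset costs with a single subset-DP feasibility check (minimum number of workers whose load stays under the candidate limit), so the work no longer grows with k.
import Mathlib
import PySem

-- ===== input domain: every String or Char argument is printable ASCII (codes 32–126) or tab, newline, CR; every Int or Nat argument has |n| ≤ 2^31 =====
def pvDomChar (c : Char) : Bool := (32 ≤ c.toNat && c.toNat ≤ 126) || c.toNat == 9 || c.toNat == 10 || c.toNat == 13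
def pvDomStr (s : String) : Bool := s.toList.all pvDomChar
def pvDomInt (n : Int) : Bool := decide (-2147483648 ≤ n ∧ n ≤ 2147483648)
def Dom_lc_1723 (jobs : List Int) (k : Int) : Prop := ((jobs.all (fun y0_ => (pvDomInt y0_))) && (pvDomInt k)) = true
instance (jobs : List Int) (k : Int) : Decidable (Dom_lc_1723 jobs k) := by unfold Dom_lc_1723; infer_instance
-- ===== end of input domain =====

-- B replaces A's k-layer min-max refresh DP by a binary search over the sorted distinct
-- subset costs with a subset-DP feasibility check (objective: alternative algorithm).

-- ===== PORT A =====
-- Loop indices are the nonnegative Python ints range(1, 1 << n); they are represented as Nat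
-- (exact: Python's `&` on nonnegative ints is Nat.land; `1 << n` is 1 <<< n).
-- Python's `i & (-i)` (two's complement) equals, for i ≥ 0, the AND with 2^i.size - i (exact).
def pyNegAnd (i : Nat) : Nat := i &&& (2 ^ i.size - i)

-- the `while sub:` loop of A; cur_i is the running value of cur[i]
def lc1723Inner (cost pre : List Int) (i : Nat) (sub : Nat) (curi : Int) : Int :=
  if h : sub = 0 then curi
  else
    let curi' := if cost.getD sub 0 < curi ∧ pre.getD (i ^^^ sub) 0 < curi
      then max (pre.getD (i ^^^ sub) 0) (cost.getD sub 0) else curi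
    lc1723Inner cost pre i ((sub - 1) &&& i) curi'
termination_by sub
decreasing_by
  have h1 : (sub - 1) &&& i ≤ sub - 1 := Nat.and_le_left
  omega

-- list indices / dict keys are always in range resp. present (proved below); the total
-- getD forms are used for Python's cost[...], cur[...], jobs[ind[...]]
def lc_1723 (jobs : List Int) (k : Int) : Int :=
  let n := jobs.length
  let ind : PySem.Dict Nat Int :=
    (List.range n).foldl (fun d i => d.insert (1 <<< i) (i : Int)) PySem.Dict.empty
  let cost : List Int := (List.range' 1 (1 <<< n - 1)).foldl
    (fun c i => c.set i (c.getD (i &&& (i - 1)) 0 + PySem.List.pyGetD jobs (ind.getD (pyNegAnd i) 0) 0))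
    (List.replicate (1 <<< n) 0)
  let pc := (List.range (k - 1).toNat).foldl
    (fun (pc : List Int × List Int) _ =>
      let cur' := (List.range' 1 (1 <<< n - 1)).foldl
        (fun cur i => cur.set i (lc1723Inner cost pc.1 i i (cur.getD i 0))) pc.2
      (cur', cur'))
    (cost, cost)
  PySem.List.pyGetD pc.1 (-1) 0

-- ===== PORT B =====
-- Python's float("inf") sentinel is ported as `none` (exact here: every finite dp value is an int,
-- inf+1 = inf, and both `x < inf` and `inf ≤ k` compare as below)
def optLtOpt (a b : Option Int) : Bool :=
  match a, b with
  | none, _ => false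
  | some _, none => true
  | some x, some y => decide (x < y)

-- the `while s:` loop of workers_needed; best is the running minimum (none = inf)
def lc1723AltBestLoop (cost : List Int) (dp : List (Option Int)) (limit : Int) (m : Nat)
    (s : Nat) (best : Option Int) : Option Int :=
  if h : s = 0 then best
  else
    let cand := (dp.getD (m ^^^ s) none).map (· + 1)
    let best' := if cost.getD s 0 ≤ limit ∧ optLtOpt cand best then cand else best
    lc1723AltBestLoop cost dp limit m ((s - 1) &&& m) best'
termination_by s
decreasing_by
  have h1 : (s - 1) &&& m ≤ s - 1 := Nat.and_le_left
  omega

def lc1723AltWorkers (cost : List Int) (full : Nat) (limit : Int) : Option Int :=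
  let dp : List (Option Int) := (List.range' 1 full).foldl
    (fun dp m => dp.set m (lc1723AltBestLoop cost dp limit m m none))
    (some 0 :: List.replicate full none)
  dp.getD full none

-- the `while lo < hi:` binary-search loop
def lc1723AltSearch (feas : Int → Bool) (cand : List Int) (lo hi : Nat) : Int :=
  if lo < hi then
    let mid := (lo + hi) / 2
    if feas (cand.getD mid 0) then lc1723AltSearch feas cand lo mid
    else lc1723AltSearch feas cand (mid + 1) hi
  else cand.getD lo 0
termination_by hi - lo
decreasing_by all_goals omega

def lc_1723_alt (jobs : List Int) (k : Int) : Int :=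
  if k ≤ 1 then jobs.sum
  else
    let cost : List Int := jobs.foldl (fun c x => c ++ c.map (· + x)) [0]
    let full := 1 <<< jobs.length - 1
    let cand := PySem.List.sorted (PySem.Set.ofList cost) (fun y => y)
    lc1723AltSearch (fun limit =>
      match lc1723AltWorkers cost full limit with
      | none => false
      | some v => decide (v ≤ k)) cand 0 (cand.length - 1)

-- ===== PRECONDITION & SPEC =====
def Spec_lc_1723 (jobs : List Int) (k : Int) (out : Int) : Prop := out = lc_1723_alt jobs k
instance (jobs : List Int) (k : Int) (out : Int) : Decidable (Spec_lc_1723 jobs k out) := by unfold Spec_lc_1723; infer_instance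

-- ===== CLAIM (what is proved, stated in full; the proofs are below) =====
def Claim_equal_lc_1723 : Prop := ∀ (jobs : List Int) (k : Int), Dom_lc_1723 jobs k → Spec_lc_1723 jobs k (lc_1723 jobs k)

-- ===== LEMMAS AND PROOFS =====

-- ---- the common mathematical skeleton (proof-side only) ----

-- sum of the jobs selected by the bits of m
def bitsSum (jobs : List Int) (m : Nat) : Int :=
  ∑ j ∈ Finset.range jobs.length, if m.testBit j then jobs.getD j 0 else 0

-- "mask m splits into at most t nonempty submasks, each of cost ≤ c"
def W (jobs : List Int) (c : Int) : Nat → Nat → Prop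
  | 0, m => m = 0
  | t+1, m => m = 0 ∨ ∃ s, s ≠ 0 ∧ s &&& m = s ∧ bitsSum jobs s ≤ c ∧ W jobs c t (m ^^^ s)

-- the decreasing submask chain s, (s-1)&m, ... that both while-loops walk
def subChain (m : Nat) (s : Nat) : List Nat :=
  if h : s = 0 then [] else s :: subChain m ((s - 1) &&& m)
termination_by s
decreasing_by
  have h1 : (s - 1) &&& m ≤ s - 1 := Nat.and_le_left
  omega

-- o ≤ t with none = +inf
def oLE (o : Option Int) (t : Int) : Prop := ∃ v, o = some v ∧ v ≤ t

-- W with the worker count bounded by an Int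
def WLE (jobs : List Int) (c : Int) (m : Nat) (t : Int) : Prop :=
  ∃ tn : Nat, (tn : Int) ≤ t ∧ W jobs c tn m

-- invariant of A's layer loop: after t refresh layers pre[m] is the best split of m
-- into at most t+1 parts, and every entry is some subset cost
def AInv (jobs : List Int) (t : Nat) (pre : List Int) : Prop :=
  pre.length = 2 ^ jobs.length ∧ pre.getD 0 0 = 0 ∧
  ∀ m, m < 2 ^ jobs.length → m ≠ 0 →
    ((∀ c, pre.getD m 0 ≤ c ↔ W jobs c (t + 1) m) ∧
     ∃ u, u < 2 ^ jobs.length ∧ pre.getD m 0 = bitsSum jobs u)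

theorem pv_testBit_div_mod (m i : Nat) : m.testBit i = ((m / 2 ^ i) % 2 == 1) := by
  simp [Nat.testBit, Nat.shiftRight_eq_div_pow]

theorem pv_tb_split (a k b : Nat) (hb : b < 2 ^ k) (l : Nat) :
    (a * 2 ^ k + b).testBit l = if l < k then b.testBit l else a.testBit (l - k) := by
  simp only [pv_testBit_div_mod]
  rcases lt_or_ge l k with h | h
  · have hdiv : (a * 2 ^ k + b) / 2 ^ l = 2 * (a * 2 ^ (k - l - 1)) + b / 2 ^ l := by
      have hk : a * 2 ^ k = 2 ^ l * (2 * (a * 2 ^ (k - l - 1))) := by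
        have h2 : (2:Nat) ^ k = 2 * 2 ^ (k - l - 1) * 2 ^ l := by
          rw [mul_assoc, ← pow_add, ← pow_succ']
          congr 1
          omega
        rw [h2]; ring
      rw [hk, Nat.mul_add_div (by positivity : (0:Nat) < 2 ^ l)]
    rw [hdiv, if_pos h]
    have : (2 * (a * 2 ^ (k - l - 1)) + b / 2 ^ l) % 2 = b / 2 ^ l % 2 := by omega
    rw [this]
  · have hdiv : (a * 2 ^ k + b) / 2 ^ l = a / 2 ^ (l - k) := by
      have hl : (2:Nat) ^ l = 2 ^ k * 2 ^ (l - k) := by rw [← pow_add]; congr 1; omega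
      rw [hl, ← Nat.div_div_eq_div_mul, mul_comm a, Nat.mul_add_div (by positivity : (0:Nat) < 2 ^ k),
        Nat.div_eq_of_lt hb, Nat.add_zero]
    rw [hdiv, if_neg (by omega)]

-- highest bit is set

theorem pv_highbit (m : Nat) (hm : m ≠ 0) : m.testBit (m.size - 1) = true := by
  have h1 : 2 ^ (m.size - 1) ≤ m := by
    have hp := Nat.size_pos.mpr (Nat.pos_of_ne_zero hm)
    exact Nat.lt_size.mp (by omega)
  have h2 : m < 2 ^ m.size := Nat.lt_size_self m
  rw [pv_testBit_div_mod]
  have hsz : m.size = (m.size - 1) + 1 := by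
    have hp := Nat.size_pos.mpr (Nat.pos_of_ne_zero hm)
    omega
  have : m / 2 ^ (m.size - 1) = 1 := by
    apply Nat.div_eq_of_lt_le (by omega)
    rw [hsz] at h2
    calc m < 2 ^ ((m.size - 1) + 1) := h2
      _ = 2 * 2 ^ (m.size - 1) := by rw [pow_succ']
  rw [this]
  rfl

theorem pv_tb_lowest (m : Nat) (hm : m ≠ 0) :
    ∃ j, m.testBit j = true ∧ ∀ l, l < j → m.testBit l = false := by
  have hex : ∃ j, m.testBit j = true := ⟨m.size - 1, pv_highbit m hm⟩
  refine ⟨Nat.find hex, Nat.find_spec hex, fun l hl => ?_⟩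
  have := Nat.find_min hex hl
  simpa using this

theorem pv_pow_le_of_testBit {m j : Nat} (hj : m.testBit j = true) : 2 ^ j ≤ m := by
  by_contra h
  rw [Nat.testBit_lt_two_pow (by omega)] at hj
  exact Bool.false_ne_true hj

theorem pv_testBit_lt_pow {m n j : Nat} (h : m < 2 ^ n) (hj : m.testBit j = true) : j < n := by
  by_contra hc
  have : m < 2 ^ j := lt_of_lt_of_le h (Nat.pow_le_pow_right (by omega) (by omega))
  rw [Nat.testBit_lt_two_pow this] at hj
  exact Bool.false_ne_true hj

theorem pv_submask_le {u w : Nat} (h : u &&& w = u) : u ≤ w := by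
  calc u = u &&& w := h.symm
    _ ≤ w := Nat.and_le_right

theorem pv_submask_testBit {s m : Nat} (h : s &&& m = s) {l : Nat} (hl : s.testBit l = true) :
    m.testBit l = true := by
  have := congrArg (fun x => x.testBit l) h
  simp only [Nat.testBit_and, hl, Bool.true_and] at this
  exact this

theorem pv_mod_two_pow_eq (m j : Nat) (hj : m.testBit j = true)
    (hlow : ∀ l, l < j → m.testBit l = false) : m % 2 ^ (j + 1) = 2 ^ j := by
  apply Nat.eq_of_testBit_eq
  intro l
  rw [Nat.testBit_mod_two_pow, Nat.testBit_two_pow]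
  rcases Nat.lt_trichotomy l j with h | h | h
  · simp [hlow l h, (show l < j + 1 by omega), (show ¬ (j = l) by omega)]
  · subst h; simp [hj]
  · simp [(show ¬ (l < j + 1) by omega), (show ¬ (j = l) by omega)]

theorem pv_low_decomp {m j : Nat} (hj : m.testBit j = true)
    (hlow : ∀ l, l < j → m.testBit l = false) : m = m / 2 ^ (j + 1) * 2 ^ (j + 1) + 2 ^ j := by
  have h1 := Nat.div_add_mod m (2 ^ (j + 1))
  have h2 := pv_mod_two_pow_eq m j hj hlow
  have hc : 2 ^ (j + 1) * (m / 2 ^ (j + 1)) = m / 2 ^ (j + 1) * 2 ^ (j + 1) := Nat.mul_comm _ _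
  omega

theorem pv_tb_pred {m j : Nat} (hj : m.testBit j = true) (hlow : ∀ l, l < j → m.testBit l = false)
    (l : Nat) : (m - 1).testBit l = (if l < j then true else if l = j then false else m.testBit l) := by
  have hd := pv_low_decomp hj hlow
  have hsub : m - 1 = m / 2 ^ (j + 1) * 2 ^ (j + 1) + (2 ^ j - 1) := by
    have hpj0 : (0:Nat) < 2 ^ j := by positivity
    omega
  have hpj : (2:Nat) ^ j < 2 ^ (j + 1) := Nat.pow_lt_pow_right (by omega) (by omega)
  have hpj0 : (0:Nat) < 2 ^ j := by positivity
  rw [hsub, pv_tb_split _ _ _ (by omega) l]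
  rcases Nat.lt_trichotomy l j with h | h | h
  · simp [Nat.testBit_two_pow_sub_one, h, (show l < j + 1 by omega)]
  · subst h; simp [Nat.testBit_two_pow_sub_one]
  · rw [if_neg (by omega), if_neg (by omega), if_neg (by omega)]
    conv_rhs => rw [hd]
    rw [pv_tb_split _ _ _ (by exact Nat.pow_lt_pow_right (by omega) (by omega)) l,
      if_neg (by omega)]

theorem pv_tb_sub_pow {m j : Nat} (hj : m.testBit j = true) (l : Nat) :
    (m - 2 ^ j).testBit l = (m.testBit l && !(decide (l = j))) := by
  have hb : (m % 2 ^ (j + 1)).testBit j = true := by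
    rw [Nat.testBit_mod_two_pow]
    simp [hj]
  have hbge : 2 ^ j ≤ m % 2 ^ (j + 1) := pv_pow_le_of_testBit hb
  have hblt : m % 2 ^ (j + 1) < 2 ^ (j + 1) := Nat.mod_lt _ (by positivity)
  have hd : m = m / 2 ^ (j + 1) * 2 ^ (j + 1) + m % 2 ^ (j + 1) := by
    have h1 := Nat.div_add_mod m (2 ^ (j + 1))
    have hc : 2 ^ (j + 1) * (m / 2 ^ (j + 1)) = m / 2 ^ (j + 1) * 2 ^ (j + 1) := Nat.mul_comm _ _
    omega
  have hsub : m - 2 ^ j = m / 2 ^ (j + 1) * 2 ^ (j + 1) + (m % 2 ^ (j + 1) - 2 ^ j) := by omega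
  have hpj : (2:Nat) ^ j < 2 ^ (j + 1) := Nat.pow_lt_pow_right (by omega) (by omega)
  -- bits of the low part b := m % 2^(j+1): b = 1 * 2^j + (b - 2^j)
  have hlowbits : ∀ l', (m % 2 ^ (j + 1) - 2 ^ j).testBit l' =
      (((m % 2 ^ (j + 1)).testBit l') && !(decide (l' = j))) := by
    intro l'
    have hbd : m % 2 ^ (j + 1) = 1 * 2 ^ j + (m % 2 ^ (j + 1) - 2 ^ j) := by omega
    have hblt2 : m % 2 ^ (j + 1) - 2 ^ j < 2 ^ j := by omega
    rcases Nat.lt_trichotomy l' j with h | h | h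
    · conv_rhs => rw [hbd]
      rw [pv_tb_split _ _ _ hblt2 l', if_pos h]
      simp [(show ¬ (l' = j) by omega)]
    · subst h
      simp [Nat.testBit_lt_two_pow hblt2]
    · rw [Nat.testBit_lt_two_pow (lt_of_lt_of_le hblt2 (Nat.pow_le_pow_right (by omega) (by omega)))]
      conv_rhs => rw [hbd]
      rw [pv_tb_split _ _ _ hblt2 l', if_neg (by omega)]
      have : (1:Nat).testBit (l' - j) = false := by
        apply Nat.testBit_lt_two_pow
        have : 1 ≤ l' - j := by omega
        calc (1:Nat) < 2 ^ 1 := by norm_num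
          _ ≤ 2 ^ (l' - j) := Nat.pow_le_pow_right (by omega) this
      simp [this]
  rw [hsub, pv_tb_split _ _ _ (by omega) l]
  conv_rhs => rw [hd]
  rw [pv_tb_split _ _ _ hblt l]
  rcases lt_or_ge l (j + 1) with h | h
  · rw [if_pos h, if_pos h, hlowbits l]
  · rw [if_neg (by omega), if_neg (by omega)]
    simp [(show ¬ (l = j) by omega)]

theorem pv_and_pred {m j : Nat} (hj : m.testBit j = true) (hlow : ∀ l, l < j → m.testBit l = false) :
    m &&& (m - 1) = m - 2 ^ j := by
  apply Nat.eq_of_testBit_eq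
  intro l
  rw [Nat.testBit_and, pv_tb_pred hj hlow l, pv_tb_sub_pow hj l]
  rcases Nat.lt_trichotomy l j with h | h | h
  · simp [hlow l h]
  · subst h; simp
  · simp [(show ¬ (l < j) by omega), (show ¬ (l = j) by omega)]

theorem pv_tb_compl : ∀ (w : Nat) (x : Nat), x < 2 ^ w → ∀ l,
    ((2 ^ w - 1) - x).testBit l = (decide (l < w) && !(x.testBit l)) := by
  intro w
  induction w with
  | zero => intro x hx l; interval_cases x; simp
  | succ w ih =>
    intro x hx l
    have hx2 : x / 2 < 2 ^ w := by
      have h2 : (2:Nat) ^ (w + 1) = 2 * 2 ^ w := by rw [pow_succ']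
      omega
    have harith : (2 ^ (w + 1) - 1) - x = 2 * ((2 ^ w - 1) - x / 2) + (1 - x % 2) := by
      have h2 : (2:Nat) ^ (w + 1) = 2 * 2 ^ w := by rw [pow_succ']
      have hm := Nat.div_add_mod x 2
      have hp : (0:Nat) < 2 ^ w := by positivity
      omega
    cases l with
    | zero =>
      rw [harith]
      simp only [Nat.testBit_zero]
      have hm := Nat.mod_two_eq_zero_or_one x
      rcases hm with h | h <;> simp [h, Nat.add_mul_mod_self_left, Nat.mul_add_mod]
    | succ l =>
      rw [harith, Nat.testBit_add_one, Nat.testBit_add_one]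
      have : (2 * (2 ^ w - 1 - x / 2) + (1 - x % 2)) / 2 = 2 ^ w - 1 - x / 2 := by omega
      rw [this, ih (x / 2) hx2 l]
      simp [Nat.lt_succ_iff, Nat.succ_lt_succ_iff]

theorem pv_pyNegAnd {m j : Nat} (hj : m.testBit j = true) (hlow : ∀ l, l < j → m.testBit l = false) :
    pyNegAnd m = 2 ^ j := by
  have hm0 : m ≠ 0 := by
    intro h; subst h; simp at hj
  have hms : m < 2 ^ m.size := Nat.lt_size_self m
  have hjs : j < m.size := pv_testBit_lt_pow hms hj
  have hcompl : 2 ^ m.size - m = (2 ^ m.size - 1) - (m - 1) := by omega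
  apply Nat.eq_of_testBit_eq
  intro l
  rw [Nat.testBit_two_pow]
  unfold pyNegAnd
  rw [Nat.testBit_and, hcompl, pv_tb_compl m.size (m - 1) (by omega) l, pv_tb_pred hj hlow l]
  rcases Nat.lt_trichotomy l j with h | h | h
  · simp [hlow l h, (show ¬ (j = l) by omega)]
  · subst h
    simp [hj, (show l < m.size by omega)]
  · rcases lt_or_ge l m.size with h2 | h2
    · cases hml : m.testBit l <;>
        simp [hml, h2, (show ¬ (l < j) by omega), (show ¬ (l = j) by omega), (show ¬ (j = l) by omega)]
    · rw [Nat.testBit_lt_two_pow (lt_of_lt_of_le hms (Nat.pow_le_pow_right (by omega) h2))]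
      simp [(show ¬ (j = l) by omega)]

theorem pv_xor_submask {m s : Nat} (hsub : s &&& m = s) : (m ^^^ s) &&& m = m ^^^ s := by
  apply Nat.eq_of_testBit_eq
  intro l
  rw [Nat.testBit_and, Nat.testBit_xor]
  cases hs : s.testBit l with
  | false => simp
  | true => simp [pv_submask_testBit hsub hs]

theorem pv_xor_eq_zero {m s : Nat} (h : m ^^^ s = 0) : m = s := by
  apply Nat.eq_of_testBit_eq
  intro l
  have := congrArg (fun x => x.testBit l) h
  simp only [Nat.testBit_xor, Nat.zero_testBit] at this
  cases h1 : m.testBit l <;> cases h2 : s.testBit l <;> simp_all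

theorem pv_xor_submask_lt {m s : Nat} (hs0 : s ≠ 0) (hsub : s &&& m = s) : m ^^^ s < m := by
  have hle : m ^^^ s ≤ m := pv_submask_le (pv_xor_submask hsub)
  rcases lt_or_eq_of_le hle with h | h
  · exact h
  · exfalso
    apply hs0
    have : m ^^^ (m ^^^ s) = m ^^^ m := by rw [h]
    simpa [Nat.xor_xor_cancel_left] using this

theorem pv_submask_max {u s m : Nat} (hs0 : s ≠ 0) (hs : s &&& m = s) (hu : u &&& m = u)
    (hus : u < s) : u ≤ (s - 1) &&& m := by
  obtain ⟨j, hj, hlow⟩ := pv_tb_lowest s hs0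
  have hd := pv_low_decomp hj hlow
  set A := s / 2 ^ (j + 1) with hA
  have hpj : (2:Nat) ^ j < 2 ^ (j + 1) := Nat.pow_lt_pow_right (by omega) (by omega)
  have hpj0 : (0:Nat) < 2 ^ j := by positivity
  -- (s-1) &&& m = A * 2^(j+1) + m % 2^j
  have hv : (s - 1) &&& m = A * 2 ^ (j + 1) + m % 2 ^ j := by
    apply Nat.eq_of_testBit_eq
    intro l
    rw [Nat.testBit_and, pv_tb_pred hj hlow l,
      pv_tb_split A (j + 1) (m % 2 ^ j) (by
        calc m % 2 ^ j < 2 ^ j := Nat.mod_lt _ (by positivity)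
          _ < 2 ^ (j + 1) := hpj) l]
    rcases Nat.lt_trichotomy l j with h | h | h
    · simp [h, (show l < j + 1 by omega), Nat.testBit_mod_two_pow]
    · subst h
      rw [if_neg (by omega), if_pos rfl, if_pos (by omega), Nat.testBit_mod_two_pow]
      simp
    · rw [if_neg (by omega), if_neg (by omega), if_neg (by omega)]
      have hsl : s.testBit l = (A.testBit (l - (j + 1))) := by
        conv_lhs => rw [hd]
        rw [pv_tb_split A (j + 1) (2 ^ j) hpj l, if_neg (by omega)]
      rw [← hsl]
      cases hb : s.testBit l with
      | false => simp
      | true => simp [pv_submask_testBit hs hb]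
  have hud : u = u / 2 ^ (j + 1) * 2 ^ (j + 1) + u % 2 ^ (j + 1) := by
    have h1 := Nat.div_add_mod u (2 ^ (j + 1))
    have hc : 2 ^ (j + 1) * (u / 2 ^ (j + 1)) = u / 2 ^ (j + 1) * 2 ^ (j + 1) := Nat.mul_comm _ _
    omega
  have humod : u % 2 ^ (j + 1) < 2 ^ (j + 1) := Nat.mod_lt _ (by positivity)
  rcases Nat.lt_trichotomy (u / 2 ^ (j + 1)) A with h | h | h
  · have hmul : (u / 2 ^ (j + 1) + 1) * 2 ^ (j + 1) = u / 2 ^ (j + 1) * 2 ^ (j + 1) + 2 ^ (j + 1) := by ring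
    have hstep : (u / 2 ^ (j + 1) + 1) * 2 ^ (j + 1) ≤ A * 2 ^ (j + 1) := mul_le_mul_right' (by omega) _
    have hmul2 : A * 2 ^ (j + 1) ≤ A * 2 ^ (j + 1) + 2 ^ j := by omega
    omega
  · -- equal high parts: compare low parts
    have hulow : u % 2 ^ (j + 1) < 2 ^ j := by
      by_contra hc
      have heq : u / 2 ^ (j + 1) * 2 ^ (j + 1) = A * 2 ^ (j + 1) := by rw [h]
      omega
    have hle2 : u % 2 ^ (j + 1) ≤ m % 2 ^ j := by
      apply pv_submask_le (w := m % 2 ^ j)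
      apply Nat.eq_of_testBit_eq
      intro l
      rw [Nat.testBit_and, Nat.testBit_mod_two_pow, Nat.testBit_mod_two_pow]
      rcases lt_or_ge l j with hl | hl
      · simp only [(show l < j + 1 by omega), hl, decide_true, Bool.true_and]
        cases hul : u.testBit l with
        | false => simp
        | true => simp [pv_submask_testBit hu hul]
      · have hjbit : u.testBit j = false := by
          have h1 : (u % 2 ^ (j + 1)).testBit j = false :=
            Nat.testBit_lt_two_pow hulow
          rwa [Nat.testBit_mod_two_pow, (show decide (j < j + 1) = true by simp),
            Bool.true_and] at h1
        by_cases hl2 : l = j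
        · subst hl2
          simp [hjbit]
        · simp [(show ¬ (l < j) by omega), (show ¬ (l < j + 1) by omega)]
    have heq : u / 2 ^ (j + 1) * 2 ^ (j + 1) = A * 2 ^ (j + 1) := by rw [h]
    omega
  · exfalso
    have hmul : (A + 1) * 2 ^ (j + 1) = A * 2 ^ (j + 1) + 2 ^ (j + 1) := by ring
    have hstep : (A + 1) * 2 ^ (j + 1) ≤ u / 2 ^ (j + 1) * 2 ^ (j + 1) := mul_le_mul_right' (by omega) _
    omega

theorem pv_mem_subChain {m : Nat} : ∀ {s}, s &&& m = s →
    ∀ {u}, (u ∈ subChain m s ↔ u ≠ 0 ∧ u &&& m = u ∧ u ≤ s) := by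
  intro s
  induction s using Nat.strong_induction_on with
  | _ s ih =>
    intro hs u
    rw [subChain]
    by_cases h0 : s = 0
    · subst h0
      rw [dif_pos rfl]
      simp only [List.not_mem_nil, false_iff]
      rintro ⟨h1, _, h3⟩
      omega
    · rw [dif_neg h0]
      have hnext_sub : ((s - 1) &&& m) &&& m = (s - 1) &&& m := by
        rw [Nat.and_assoc, Nat.and_self]
      have hnext_lt : (s - 1) &&& m < s := by
        have := Nat.and_le_left (n := s - 1) (m := m)
        omega
      rw [List.mem_cons, ih _ hnext_lt hnext_sub]
      constructor
      · rintro (rfl | ⟨h1, h2, h3⟩)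
        · exact ⟨h0, hs, le_refl _⟩
        · exact ⟨h1, h2, le_trans h3 (by omega)⟩
      · rintro ⟨h1, h2, h3⟩
        rcases eq_or_lt_of_le h3 with rfl | hlt
        · exact Or.inl rfl
        · exact Or.inr ⟨h1, h2, pv_submask_max h0 hs h2 hlt⟩

theorem pv_bitsSum_zero (jobs : List Int) : bitsSum jobs 0 = 0 := by
  simp [bitsSum]

theorem pv_bitsSum_clear {jobs : List Int} {m j : Nat} (hj : m.testBit j = true)
    (hjn : j < jobs.length) : bitsSum jobs m = bitsSum jobs (m - 2 ^ j) + jobs.getD j 0 := by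
  unfold bitsSum
  have hmem : j ∈ Finset.range jobs.length := Finset.mem_range.mpr hjn
  rw [← Finset.add_sum_erase _ _ hmem, ← Finset.add_sum_erase _ _ hmem]
  have h2 : (if (m - 2 ^ j).testBit j then jobs.getD j 0 else 0) = 0 := by
    rw [pv_tb_sub_pow hj j]
    simp
  have h3 : ∀ l ∈ (Finset.range jobs.length).erase j,
      (if (m - 2 ^ j).testBit l then jobs.getD l 0 else 0) =
      (if m.testBit l then jobs.getD l 0 else 0) := by
    intro l hl
    rw [Finset.mem_erase] at hl
    rw [pv_tb_sub_pow hj l]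
    simp [hl.1]
  rw [Finset.sum_congr rfl h3, h2, hj]
  simp
  ring

theorem pv_sum_range_getD (jobs : List Int) :
    ∑ j ∈ Finset.range jobs.length, jobs.getD j 0 = jobs.sum := by
  induction jobs using List.reverseRecOn with
  | nil => simp
  | append_singleton ys y ih =>
    rw [List.length_append, List.length_singleton, Finset.sum_range_succ]
    simp only [List.sum_append, List.sum_singleton]
    congr 1
    · rw [← ih]
      apply Finset.sum_congr rfl
      intro l hl
      rw [Finset.mem_range] at hl
      rw [List.getD_append _ _ _ _ hl]
    · rw [List.getD_append_right _ _ _ _ (le_refl _)]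
      simp

theorem pv_bitsSum_full (jobs : List Int) : bitsSum jobs (2 ^ jobs.length - 1) = jobs.sum := by
  unfold bitsSum
  have h1 : ∀ j ∈ Finset.range jobs.length,
      (if (2 ^ jobs.length - 1 : Nat).testBit j then jobs.getD j 0 else 0) = jobs.getD j 0 := by
    intro j hj
    rw [Finset.mem_range] at hj
    simp [Nat.testBit_two_pow_sub_one, hj]
  rw [Finset.sum_congr rfl h1, pv_sum_range_getD]

theorem pv_W_zero (jobs : List Int) (c : Int) (t : Nat) : W jobs c t 0 := by
  cases t <;> simp [W]

theorem pv_W_succ (jobs : List Int) (c : Int) : ∀ t m, W jobs c t m → W jobs c (t + 1) m := by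
  intro t
  induction t with
  | zero => intro m h; rw [W] at h; subst h; exact pv_W_zero jobs c 1
  | succ t ih =>
    intro m h
    rw [W] at h
    rcases h with h | ⟨s, h1, h2, h3, h4⟩
    · subst h; exact pv_W_zero jobs c _
    · rw [W]
      exact Or.inr ⟨s, h1, h2, h3, ih _ h4⟩

theorem pv_W_mono_t (jobs : List Int) (c : Int) {t t' : Nat} (h : t ≤ t') {m : Nat}
    (hw : W jobs c t m) : W jobs c t' m := by
  induction t' with
  | zero => rwa [(show t = 0 by omega)] at hw
  | succ t' ih =>
    rcases Nat.lt_or_ge t (t' + 1) with h2 | h2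
    · exact pv_W_succ jobs c t' m (ih (by omega))
    · rwa [(show t = t' + 1 by omega)] at hw

theorem pv_W_one {jobs : List Int} {c : Int} {m : Nat} (hm : m ≠ 0) :
    W jobs c 1 m ↔ bitsSum jobs m ≤ c := by
  rw [W]
  constructor
  · rintro (h | ⟨s, h1, h2, h3, h4⟩)
    · exact absurd h hm
    · rw [W] at h4
      have : m = s := pv_xor_eq_zero h4
      subst this
      exact h3
  · intro h
    exact Or.inr ⟨m, hm, Nat.and_self m, h, by rw [Nat.xor_self]; exact pv_W_zero jobs c 0⟩

theorem pv_foldl_min_le_iff (f : Nat → Int) (l : List Nat) (init c : Int) :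
    l.foldl (fun a s => min a (f s)) init ≤ c ↔ init ≤ c ∨ ∃ s ∈ l, f s ≤ c := by
  induction l generalizing init with
  | nil => simp
  | cons x xs ih =>
    rw [List.foldl_cons, ih]
    constructor
    · rintro (h | ⟨s, hs, hfs⟩)
      · rcases (le_or_gt init c : init ≤ c ∨ init > c) with h2 | h2
        · exact Or.inl h2
        · right
          refine ⟨x, List.mem_cons_self, ?_⟩
          rcases min_cases init (f x) with ⟨hm, hle⟩ | ⟨hm, hle⟩
          · rw [hm] at h; omega
          · rw [hm] at h; exact h
      · exact Or.inr ⟨s, List.mem_cons_of_mem _ hs, hfs⟩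
    · rintro (h | ⟨s, hs, hfs⟩)
      · exact Or.inl (le_trans (min_le_left _ _) h)
      · rcases List.mem_cons.mp hs with rfl | hs2
        · exact Or.inl (le_trans (min_le_right _ _) hfs)
        · exact Or.inr ⟨s, hs2, hfs⟩

theorem pv_foldl_min_mem (f : Nat → Int) (l : List Nat) (init : Int) :
    l.foldl (fun a s => min a (f s)) init = init ∨
      ∃ s ∈ l, l.foldl (fun a s => min a (f s)) init = f s := by
  induction l generalizing init with
  | nil => simp
  | cons x xs ih =>
    rw [List.foldl_cons]
    rcases ih (min init (f x)) with h | ⟨s, hs, hfs⟩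
    · rcases min_cases init (f x) with ⟨h2, _⟩ | ⟨h2, _⟩
      · exact Or.inl (by rw [h, h2])
      · exact Or.inr ⟨x, List.mem_cons_self, by rw [h, h2]⟩
    · exact Or.inr ⟨s, List.mem_cons_of_mem _ hs, hfs⟩

theorem pv_oLE_condmin (C : Nat → Prop) [DecidablePred C] (g : Nat → Option Int) (l : List Nat)
    (init : Option Int) (t : Int) :
    oLE (l.foldl (fun b s => if C s ∧ optLtOpt (g s) b then g s else b) init) t ↔
      oLE init t ∨ ∃ s ∈ l, C s ∧ oLE (g s) t := by
  induction l generalizing init with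
  | nil => simp
  | cons x xs ih =>
    rw [List.foldl_cons, ih]
    have hstep : oLE (if C x ∧ optLtOpt (g x) init then g x else init) t ↔
        oLE init t ∨ (C x ∧ oLE (g x) t) := by
      split_ifs with h
      · rcases h with ⟨hc, hlt⟩
        constructor
        · intro h2; exact Or.inr ⟨hc, h2⟩
        · rintro (⟨v, hv, hvt⟩ | ⟨_, h2⟩)
          · rcases hg : g x with _ | w
            · rw [hg] at hlt; simp [optLtOpt] at hlt
            · refine ⟨w, rfl, ?_⟩
              rw [hg, hv] at hlt
              simp [optLtOpt] at hlt
              omega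
          · exact h2
      · constructor
        · exact fun h2 => Or.inl h2
        · rintro (h2 | ⟨hc, w, hw, hwt⟩)
          · exact h2
          · rcases hinit : init with _ | v
            · rw [hinit, hw] at h
              simp [optLtOpt, hc] at h
            · refine ⟨v, rfl, ?_⟩
              rw [hinit, hw] at h
              simp [optLtOpt, hc] at h
              omega
    rw [hstep]
    constructor
    · rintro (h | ⟨s, hs, hcs, hgs⟩)
      · rcases h with h | h
        · exact Or.inl h
        · exact Or.inr ⟨x, List.mem_cons_self, h⟩
      · exact Or.inr ⟨s, List.mem_cons_of_mem _ hs, hcs, hgs⟩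
    · rintro (h | ⟨s, hs, hcs, hgs⟩)
      · exact Or.inl (Or.inl h)
      · rcases List.mem_cons.mp hs with rfl | hs2
        · exact Or.inl (Or.inr ⟨hcs, hgs⟩)
        · exact Or.inr ⟨s, hs2, hcs, hgs⟩

theorem pv_bitsSum_append_low {p : List Int} {x : Int} {m : Nat} (hm : m < 2 ^ p.length) :
    bitsSum (p ++ [x]) m = bitsSum p m := by
  unfold bitsSum
  rw [List.length_append, List.length_singleton, Finset.sum_range_succ,
    Nat.testBit_lt_two_pow hm]
  simp only [Bool.false_eq_true, if_false, add_zero]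
  apply Finset.sum_congr rfl
  intro j hj
  rw [Finset.mem_range] at hj
  rw [List.getD_append _ _ _ _ hj]

theorem pv_bitsSum_append_high {p : List Int} {x : Int} {m : Nat} (hm : m < 2 ^ p.length) :
    bitsSum (p ++ [x]) (2 ^ p.length + m) = bitsSum p m + x := by
  unfold bitsSum
  rw [List.length_append, List.length_singleton, Finset.sum_range_succ]
  have htop : (2 ^ p.length + m).testBit p.length = true := by
    have := pv_tb_split 1 p.length m hm p.length
    simpa using this
  rw [htop]
  simp only [if_true]
  rw [List.getD_append_right _ _ _ _ (le_refl _), Nat.sub_self]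
  simp only [List.getD_cons_zero]
  congr 1
  apply Finset.sum_congr rfl
  intro j hj
  rw [Finset.mem_range] at hj
  have hbit : (2 ^ p.length + m).testBit j = m.testBit j := by
    have := pv_tb_split 1 p.length m hm j
    rw [if_pos hj] at this
    simpa using this
  rw [hbit, List.getD_append _ _ _ _ hj]

theorem pv_table_step (p : List Int) (x : Int) :
    (List.range (2 ^ p.length)).map (bitsSum p) ++
      ((List.range (2 ^ p.length)).map (bitsSum p)).map (· + x) =
    (List.range (2 ^ (p ++ [x]).length)).map (bitsSum (p ++ [x])) := by
  rw [List.length_append, List.length_singleton,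
    (show (2:Nat) ^ (p.length + 1) = 2 ^ p.length + 2 ^ p.length by ring), List.range_add,
    List.map_append]
  congr 1
  · apply List.map_congr_left
    intro m hm
    rw [List.mem_range] at hm
    exact (pv_bitsSum_append_low hm).symm
  · rw [List.map_map, List.map_map]
    apply List.map_congr_left
    intro m hm
    rw [List.mem_range] at hm
    simp only [Function.comp_apply]
    rw [pv_bitsSum_append_high hm]

theorem pv_costB_gen : ∀ (rest p : List Int),
    rest.foldl (fun c x => c ++ c.map (· + x)) ((List.range (2 ^ p.length)).map (bitsSum p)) =
      (List.range (2 ^ (p ++ rest).length)).map (bitsSum (p ++ rest)) := by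
  intro rest
  induction rest with
  | nil => intro p; simp
  | cons x rest ih =>
    intro p
    rw [List.foldl_cons, pv_table_step p x, ih (p ++ [x])]
    rw [List.append_assoc]
    rfl

theorem pv_costB_spec (jobs : List Int) :
    jobs.foldl (fun c x => c ++ c.map (· + x)) [0] =
      (List.range (2 ^ jobs.length)).map (fun m => bitsSum jobs m) := by
  have h0 : ((List.range (2 ^ ([] : List Int).length)).map (bitsSum [])) = [0] := by
    simp [bitsSum]
  rw [← h0, pv_costB_gen jobs []]
  rfl

theorem pv_getD_set_self {α : Type} (xs : List α) (n : Nat) (v d : α) (h : n < xs.length) :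
    (xs.set n v).getD n d = v := by simp [List.getD, h]

theorem pv_getD_set_ne {α : Type} (xs : List α) (n : Nat) (v : α) (m : Nat) (d : α) (h : m ≠ n) :
    (xs.set n v).getD m d = xs.getD m d := by
  simp [List.getD, List.getElem?_set_ne (Ne.symm h)]

theorem pv_ind_spec (n : Nat) {j : Nat} (hj : j < n) :
    ((List.range n).foldl (fun d i => d.insert (2 ^ i) (i : Int)) PySem.Dict.empty).getD
      (2 ^ j) 0 = (j : Int) := by
  induction n with
  | zero => omega
  | succ n ih =>
    rw [List.range_succ, List.foldl_append, List.foldl_cons, List.foldl_nil]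
    rcases Nat.lt_or_ge j n with h | h
    · rw [PySem.Dict.getD_insert_of_ne _ _ _
        (fun he => (by omega : j ≠ n) (Nat.pow_right_injective (le_refl 2) he))]
      exact ih h
    · have : j = n := by omega
      subst this
      rw [PySem.Dict.getD_insert_self]

theorem pv_costA_fold (jobs : List Int) (jlen : Nat) (hjl : jlen ≤ 2 ^ jobs.length - 1) :
    ((List.range' 1 jlen).foldl
      (fun c i => c.set i (c.getD (i &&& (i - 1)) 0 + PySem.List.pyGetD jobs
        (((List.range jobs.length).foldl (fun d i => d.insert (2 ^ i) (i : Int)) PySem.Dict.empty).getD (pyNegAnd i) 0) 0))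
      (List.replicate (2 ^ jobs.length) 0)).length = 2 ^ jobs.length ∧
    ∀ m, m < 2 ^ jobs.length →
      ((List.range' 1 jlen).foldl
        (fun c i => c.set i (c.getD (i &&& (i - 1)) 0 + PySem.List.pyGetD jobs
          (((List.range jobs.length).foldl (fun d i => d.insert (2 ^ i) (i : Int)) PySem.Dict.empty).getD (pyNegAnd i) 0) 0))
        (List.replicate (2 ^ jobs.length) 0)).getD m 0 =
        (if m ≤ jlen then bitsSum jobs m else 0) := by
  induction jlen with
  | zero =>
    constructor
    · simp
    · intro m hm
      rcases Nat.eq_zero_or_pos m with rfl | h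
      · simp [bitsSum]
      · rw [if_neg (by omega)]
        simp [List.getD, List.getElem?_replicate]
        split <;> rfl
  | succ jl ih =>
    obtain ⟨ihlen, ihval⟩ := ih (by omega)
    rw [List.range'_1_concat, List.foldl_append, List.foldl_cons, List.foldl_nil] at *
    constructor
    · rw [List.length_set]
      exact ihlen
    · intro m hm
      set i := 1 + jl with hi
      have hi0 : i ≠ 0 := by omega
      have hilt : i < 2 ^ jobs.length := by
        have : (0:Nat) < 2 ^ jobs.length := by positivity
        omega
      obtain ⟨j, hj, hlow⟩ := pv_tb_lowest i hi0
      have hjn : j < jobs.length := pv_testBit_lt_pow hilt hj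
      have hpow : 2 ^ j ≤ i := pv_pow_le_of_testBit hj
      have hpj0 : (0:Nat) < 2 ^ j := by positivity
      -- the value written at index i
      have hval : ∀ (c : List Int), c.getD ((i &&& (i-1))) 0 = bitsSum jobs (i - 2 ^ j) →
          c.getD (i &&& (i - 1)) 0 + PySem.List.pyGetD jobs
            (((List.range jobs.length).foldl (fun d i => d.insert (2 ^ i) (i : Int)) PySem.Dict.empty).getD (pyNegAnd i) 0) 0
            = bitsSum jobs i := by
        intro c hc
        rw [hc, pv_pyNegAnd hj hlow, pv_ind_spec jobs.length hjn,
          PySem.List.pyGetD_natCast, ← pv_bitsSum_clear hj hjn]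
      rcases eq_or_ne m i with rfl | hne
      · rw [pv_getD_set_self _ _ _ _ (by rw [ihlen]; exact hilt), if_pos (by omega : i ≤ jl + 1)]
        apply hval
        rw [pv_and_pred hj hlow]
        rw [ihval _ (by omega), if_pos (by omega)]
      · rw [pv_getD_set_ne _ _ _ _ _ hne, ihval _ hm]
        by_cases h : m ≤ jl
        · rw [if_pos h, if_pos (by omega)]
        · rw [if_neg h, if_neg (by omega)]

theorem pv_ite_minmax (p c x : Int) : (if c < x ∧ p < x then max p c else x) = min x (max p c) := by
  simp only [min_def, max_def]
  split_ifs <;> omega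

theorem pv_inner_eq_fold (cost pre : List Int) (i : Nat) : ∀ sub curi,
    lc1723Inner cost pre i sub curi =
      (subChain i sub).foldl (fun a s => min a (max (pre.getD (i ^^^ s) 0) (cost.getD s 0))) curi := by
  intro sub
  induction sub using Nat.strong_induction_on with
  | _ sub ih =>
    intro curi
    rw [lc1723Inner, subChain]
    by_cases h0 : sub = 0
    · rw [dif_pos h0, dif_pos h0]
      simp
    · rw [dif_neg h0, dif_neg h0, List.foldl_cons]
      have hlt : (sub - 1) &&& i < sub := by
        have := Nat.and_le_left (n := sub - 1) (m := i)
        omega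
      rw [ih _ hlt]
      congr 1
      exact pv_ite_minmax _ _ _

theorem pv_layer_fold (cost pre : List Int) (n : Nat) (hlen : pre.length = 2 ^ n) (jl : Nat)
    (hjl : jl ≤ 2 ^ n - 1) :
    ((List.range' 1 jl).foldl
        (fun cur i => cur.set i (lc1723Inner cost pre i i (cur.getD i 0))) pre).length = 2 ^ n ∧
    ∀ m, ((List.range' 1 jl).foldl
        (fun cur i => cur.set i (lc1723Inner cost pre i i (cur.getD i 0))) pre).getD m 0 =
      if 1 ≤ m ∧ m ≤ jl then lc1723Inner cost pre m m (pre.getD m 0) else pre.getD m 0 := by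
  induction jl with
  | zero =>
    refine ⟨by simpa, fun m => ?_⟩
    rw [if_neg (by omega)]
    simp
  | succ jl ih =>
    obtain ⟨ihlen, ihval⟩ := ih (by omega)
    rw [List.range'_1_concat, List.foldl_append, List.foldl_cons, List.foldl_nil] at *
    set i := 1 + jl with hi
    have hilt : i < 2 ^ n := by
      have : (0:Nat) < 2 ^ n := by positivity
      omega
    constructor
    · rw [List.length_set]; exact ihlen
    · intro m
      have hacc : (((List.range' 1 jl).foldl
          (fun cur i => cur.set i (lc1723Inner cost pre i i (cur.getD i 0))) pre)).getD i 0 = pre.getD i 0 := by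
        rw [ihval i, if_neg (by omega)]
      rcases eq_or_ne m i with rfl | hne
      · rw [pv_getD_set_self _ _ _ _ (by rw [ihlen]; exact hilt), hacc, if_pos (by omega)]
      · rw [pv_getD_set_ne _ _ _ _ _ hne, ihval m]
        by_cases h : 1 ≤ m ∧ m ≤ jl
        · rw [if_pos h, if_pos (by omega)]
        · rw [if_neg h, if_neg (by omega)]

theorem pv_AInv_zero (jobs : List Int) (cost : List Int)
    (hlen : cost.length = 2 ^ jobs.length)
    (hval : ∀ m, m < 2 ^ jobs.length → cost.getD m 0 = bitsSum jobs m) :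
    AInv jobs 0 cost := by
  refine ⟨hlen, ?_, fun m hm hm0 => ⟨fun c => ?_, ⟨m, hm, hval m hm⟩⟩⟩
  · rw [hval 0 (by positivity), pv_bitsSum_zero]
  · rw [hval m hm, pv_W_one hm0]

theorem pv_AInv_step (jobs : List Int) (t : Nat) (cost pre : List Int)
    (hclen : cost.length = 2 ^ jobs.length)
    (hcval : ∀ m, m < 2 ^ jobs.length → cost.getD m 0 = bitsSum jobs m)
    (h : AInv jobs t pre) :
    AInv jobs (t + 1)
      ((List.range' 1 (2 ^ jobs.length - 1)).foldl
        (fun cur i => cur.set i (lc1723Inner cost pre i i (cur.getD i 0))) pre) := by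
  obtain ⟨hlen, hzero, hinv⟩ := h
  obtain ⟨hflen, hfval⟩ := pv_layer_fold cost pre jobs.length hlen (2 ^ jobs.length - 1) (le_refl _)
  refine ⟨hflen, ?_, fun m hm hm0 => ?_⟩
  · rw [hfval 0, if_neg (by omega)]
    exact hzero
  · rw [hfval m, if_pos (by omega), pv_inner_eq_fold]
    have hchain : ∀ {u : Nat}, u ∈ subChain m m ↔ u ≠ 0 ∧ u &&& m = u ∧ u ≤ m :=
      fun {u} => pv_mem_subChain (Nat.and_self m)
    constructor
    · intro c
      rw [pv_foldl_min_le_iff]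
      constructor
      · rintro (hp | ⟨s, hs, hfs⟩)
        · exact pv_W_succ jobs c _ _ ((hinv m hm hm0).1 c |>.mp hp)
        · obtain ⟨hs0, hssub, hsle⟩ := hchain.mp hs
          rw [max_le_iff] at hfs
          obtain ⟨hp, hc⟩ := hfs
          rw [hcval s (by omega)] at hc
          rcases eq_or_ne (m ^^^ s) 0 with hx0 | hx0
          · have : m = s := pv_xor_eq_zero hx0
            subst this
            rw [W]
            exact Or.inr ⟨m, hs0, hssub, hc, by rw [hx0]; exact pv_W_zero jobs c _⟩
          · have hxlt : m ^^^ s < m := pv_xor_submask_lt hs0 hssub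
            have hWx : W jobs c (t + 1) (m ^^^ s) := (hinv _ (by omega) hx0).1 c |>.mp hp
            rw [W]
            exact Or.inr ⟨s, hs0, hssub, hc, hWx⟩
      · intro hw
        rw [W] at hw
        rcases hw with hw | ⟨s, hs0, hssub, hsc, hwx⟩
        · exact absurd hw hm0
        · rcases eq_or_ne (m ^^^ s) 0 with hx0 | hx0
          · have : m = s := pv_xor_eq_zero hx0
            subst this
            left
            rw [(hinv m hm hm0).1 c]
            rw [W]
            exact Or.inr ⟨m, hs0, hssub, hsc, by rw [Nat.xor_self]; exact pv_W_zero jobs c _⟩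
          · right
            refine ⟨s, hchain.mpr ⟨hs0, hssub, pv_submask_le hssub⟩, ?_⟩
            rw [max_le_iff, hcval s (by have := pv_submask_le hssub; omega)]
            have hxlt : m ^^^ s < m := pv_xor_submask_lt hs0 hssub
            exact ⟨(hinv _ (by omega) hx0).1 c |>.mpr hwx, hsc⟩
    · rcases pv_foldl_min_mem (fun s => max (pre.getD (m ^^^ s) 0) (cost.getD s 0))
        (subChain m m) (pre.getD m 0) with hmm | ⟨s, hs, hfs⟩
      · rw [hmm]
        exact (hinv m hm hm0).2
      · rw [hfs]
        obtain ⟨hs0, hssub, hsle⟩ := hchain.mp hs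
        rcases max_choice (pre.getD (m ^^^ s) 0) (cost.getD s 0) with hmx | hmx <;> rw [hmx]
        · rcases eq_or_ne (m ^^^ s) 0 with hx0 | hx0
          · rw [hx0, hzero]
            exact ⟨0, by positivity, (pv_bitsSum_zero jobs).symm⟩
          · have hxlt : m ^^^ s < m := pv_xor_submask_lt hs0 hssub
            exact (hinv _ (by omega) hx0).2
        · rw [hcval s (by omega)]
          exact ⟨s, by omega, rfl⟩

theorem pv_oLE_map (o : Option Int) (t : Int) : oLE (o.map (· + 1)) t ↔ oLE o (t - 1) := by
  cases o with
  | none => simp [oLE]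
  | some v =>
    simp only [Option.map_some, oLE]
    constructor
    · rintro ⟨w, hw, hwt⟩
      exact ⟨v, rfl, by injection hw with h; omega⟩
    · rintro ⟨w, hw, hwt⟩
      exact ⟨v + 1, rfl, by injection hw with h; omega⟩

theorem pv_best_eq_fold (cost : List Int) (dp : List (Option Int)) (limit : Int) (m : Nat) :
    ∀ s best, lc1723AltBestLoop cost dp limit m s best =
      (subChain m s).foldl (fun b s => if cost.getD s 0 ≤ limit ∧
        optLtOpt ((dp.getD (m ^^^ s) none).map (· + 1)) b
        then (dp.getD (m ^^^ s) none).map (· + 1) else b) best := by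
  intro s
  induction s using Nat.strong_induction_on with
  | _ s ih =>
    intro best
    rw [lc1723AltBestLoop, subChain]
    by_cases h0 : s = 0
    · rw [dif_pos h0, dif_pos h0]
      simp
    · rw [dif_neg h0, dif_neg h0, List.foldl_cons]
      have hlt : (s - 1) &&& m < s := by
        have := Nat.and_le_left (n := s - 1) (m := m)
        omega
      rw [ih _ hlt]

theorem pv_WLE_step (jobs : List Int) (limit : Int) (m : Nat) (hm : m ≠ 0) (t : Int) :
    (∃ s, (s ≠ 0 ∧ s &&& m = s) ∧ bitsSum jobs s ≤ limit ∧ WLE jobs limit (m ^^^ s) (t - 1)) ↔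
      WLE jobs limit m t := by
  constructor
  · rintro ⟨s, ⟨hs0, hssub⟩, hc, tn', hle, hw⟩
    refine ⟨tn' + 1, by push_cast; omega, ?_⟩
    rw [W]
    exact Or.inr ⟨s, hs0, hssub, hc, hw⟩
  · rintro ⟨tn, hle, hw⟩
    cases tn with
    | zero => rw [W] at hw; exact absurd hw hm
    | succ tn' =>
      rw [W] at hw
      rcases hw with hw | ⟨s, hs0, hssub, hc, hw⟩
      · exact absurd hw hm
      · exact ⟨s, ⟨hs0, hssub⟩, hc, ⟨tn', by push_cast at hle ⊢; omega, hw⟩⟩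

theorem pv_dp_fold (jobs : List Int) (limit : Int) (cost : List Int) (full : Nat)
    (hfull : full = 2 ^ jobs.length - 1)
    (hcval : ∀ m, m < 2 ^ jobs.length → cost.getD m 0 = bitsSum jobs m) :
    ∀ jl, jl ≤ full →
    ((List.range' 1 jl).foldl
      (fun dp m => dp.set m (lc1723AltBestLoop cost dp limit m m none))
      (some 0 :: List.replicate full none)).length = full + 1 ∧
    ∀ m, m ≤ jl → ∀ t,
      (oLE (((List.range' 1 jl).foldl
        (fun dp m => dp.set m (lc1723AltBestLoop cost dp limit m m none))
        (some 0 :: List.replicate full none)).getD m none) t ↔ WLE jobs limit m t) := by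
  intro jl
  induction jl with
  | zero =>
    intro _
    refine ⟨by simp, fun m hm t => ?_⟩
    have hm0 : m = 0 := by omega
    subst hm0
    simp only [List.range'_zero, List.foldl_nil, List.getD_cons_zero]
    constructor
    · rintro ⟨v, hv, hvt⟩
      injection hv with h
      exact ⟨0, by omega, pv_W_zero jobs limit 0⟩
    · rintro ⟨tn, hle, _⟩
      exact ⟨0, rfl, by omega⟩
  | succ jl ih =>
    intro hjl
    obtain ⟨ihlen, ihval⟩ := ih (by omega)
    rw [List.range'_1_concat, List.foldl_append, List.foldl_cons, List.foldl_nil] at *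
    set i := 1 + jl with hi
    have hi0 : i ≠ 0 := by omega
    constructor
    · rw [List.length_set]; exact ihlen
    · intro m hm t
      rcases eq_or_ne m i with rfl | hne
      · rw [pv_getD_set_self _ _ _ _ (by rw [ihlen]; omega)]
        rw [pv_best_eq_fold]
        rw [pv_oLE_condmin (fun s => cost.getD s 0 ≤ limit)
          (fun s => (((List.range' 1 jl).foldl
            (fun dp m => dp.set m (lc1723AltBestLoop cost dp limit m m none))
            (some 0 :: List.replicate full none)).getD (i ^^^ s) none).map (· + 1))]
        rw [← pv_WLE_step jobs limit i hi0 t]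
        have hnone : ¬ oLE none t := by rintro ⟨v, hv, _⟩; cases hv
        constructor
        · rintro (h | ⟨s, hs, hC, hg⟩)
          · exact absurd h hnone
          · obtain ⟨hs0, hssub, hsle⟩ := (pv_mem_subChain (Nat.and_self i)).mp hs
            have hxlt : i ^^^ s < i := pv_xor_submask_lt hs0 hssub
            rw [pv_oLE_map, ihval _ (by omega)] at hg
            refine ⟨s, ⟨hs0, hssub⟩, ?_, hg⟩
            rw [← hcval s (by omega)]
            exact hC
        · rintro ⟨s, ⟨hs0, hssub⟩, hc, hwle⟩
          right
          have hxlt : i ^^^ s < i := pv_xor_submask_lt hs0 hssub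
          refine ⟨s, (pv_mem_subChain (Nat.and_self i)).mpr ⟨hs0, hssub, pv_submask_le hssub⟩, ?_, ?_⟩
          · rw [hcval s (by have := pv_submask_le hssub; omega)]
            exact hc
          · rw [pv_oLE_map, ihval _ (by omega)]
            exact hwle
      · rw [pv_getD_set_ne _ _ _ _ _ hne]
        exact ihval m (by omega) t

theorem pv_workers_spec (jobs : List Int) (limit : Int) (cost : List Int)
    (hcval : ∀ m, m < 2 ^ jobs.length → cost.getD m 0 = bitsSum jobs m) (t : Int) :
    oLE (lc1723AltWorkers cost (2 ^ jobs.length - 1) limit) t ↔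
      WLE jobs limit (2 ^ jobs.length - 1) t := by
  obtain ⟨hlen, hval⟩ := pv_dp_fold jobs limit cost (2 ^ jobs.length - 1) rfl hcval
    (2 ^ jobs.length - 1) (le_refl _)
  exact hval _ (le_refl _) t

theorem pv_search_spec (feas : Int → Bool) (cand : List Int) (ans : Nat)
    (hans : ∀ idx, idx < cand.length → (feas (cand.getD idx 0) = true ↔ ans ≤ idx)) :
    ∀ fuel lo hi, hi - lo ≤ fuel → lo ≤ ans → ans ≤ hi → hi < cand.length →
      lc1723AltSearch feas cand lo hi = cand.getD ans 0 := by
  intro fuel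
  induction fuel with
  | zero =>
    intro lo hi h1 h2 h3 h4
    rw [lc1723AltSearch, if_neg (by omega)]
    congr 1
    omega
  | succ fuel ih =>
    intro lo hi h1 h2 h3 h4
    rw [lc1723AltSearch]
    by_cases hlh : lo < hi
    · rw [if_pos hlh]
      have hmid1 : lo ≤ (lo + hi) / 2 := by omega
      have hmid2 : (lo + hi) / 2 < hi := by omega
      by_cases hf : feas (cand.getD ((lo + hi) / 2) 0)
      · rw [if_pos hf]
        have := (hans _ (by omega)).mp hf
        exact ih lo ((lo + hi) / 2) (by omega) h2 this (by omega)
      · rw [if_neg hf]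
        have : ¬ (ans ≤ (lo + hi) / 2) := fun hc => hf ((hans _ (by omega)).mpr hc)
        exact ih ((lo + hi) / 2 + 1) hi (by omega) (by omega) h3 h4
    · rw [if_neg hlh]
      congr 1
      omega


-- ---- A: value of the port ----

theorem pv_last_eq (n : Nat) (X : List Int) (hlen : X.length = 2 ^ n) :
    PySem.List.pyGetD X (-1) 0 = X.getD (2 ^ n - 1) 0 := by
  have hpos : (0:Nat) < 2 ^ n := by positivity
  have hne : X ≠ [] := by
    intro h
    rw [h] at hlen
    simp at hlen
    omega
  rw [PySem.List.pyGetD_neg_one _ _ hne, List.getLast_eq_getElem hne,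
    List.getD_eq_getElem _ _ (by omega)]
  congr 1
  omega

theorem pv_A_spec (jobs : List Int) (k : Int) :
    ∃ pre, AInv jobs (k - 1).toNat pre ∧ lc_1723 jobs k = pre.getD (2 ^ jobs.length - 1) 0 := by
  obtain ⟨hclen, hcval⟩ := pv_costA_fold jobs (2 ^ jobs.length - 1) (le_refl _)
  simp only [lc_1723, Nat.one_shiftLeft]
  set costE := (List.range' 1 (2 ^ jobs.length - 1)).foldl
    (fun c i => c.set i (c.getD (i &&& (i - 1)) 0 + PySem.List.pyGetD jobs
      (((List.range jobs.length).foldl (fun d i => d.insert (2 ^ i) (i : Int)) PySem.Dict.empty).getD (pyNegAnd i) 0) 0))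
    (List.replicate (2 ^ jobs.length) 0) with hcostE
  have hcv : ∀ m, m < 2 ^ jobs.length → costE.getD m 0 = bitsSum jobs m := fun m hm => by
    rw [hcval m hm, if_pos (by omega)]
  have hiter : ∀ T, ∃ pre : List Int,
      ((List.range T).foldl
        (fun (pc : List Int × List Int) _ =>
          ((List.range' 1 (2 ^ jobs.length - 1)).foldl
            (fun cur i => cur.set i (lc1723Inner costE pc.1 i i (cur.getD i 0))) pc.2,
           (List.range' 1 (2 ^ jobs.length - 1)).foldl
            (fun cur i => cur.set i (lc1723Inner costE pc.1 i i (cur.getD i 0))) pc.2))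
        (costE, costE)) = (pre, pre) ∧ AInv jobs T pre := by
    intro T
    induction T with
    | zero =>
      exact ⟨costE, rfl, pv_AInv_zero jobs costE hclen hcv⟩
    | succ T ih =>
      obtain ⟨pre, hfold, hinv⟩ := ih
      rw [List.range_succ, List.foldl_append, List.foldl_cons, List.foldl_nil, hfold]
      exact ⟨_, rfl, pv_AInv_step jobs T costE pre hclen hcv hinv⟩
  obtain ⟨pre, hfold, hinv⟩ := hiter (k - 1).toNat
  rw [hfold]
  exact ⟨pre, hinv, pv_last_eq jobs.length pre hinv.1⟩

-- ---- assembly ----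

theorem pv_getD_map_range (f : Nat → Int) (N m : Nat) (h : m < N) :
    ((List.range N).map f).getD m 0 = f m := by
  rw [List.getD_eq_getElem _ _ (by simpa using h)]
  simp

theorem pv_main (jobs : List Int) (k : Int) : lc_1723 jobs k = lc_1723_alt jobs k := by
  obtain ⟨pre, hinv, hval⟩ := pv_A_spec jobs k
  obtain ⟨hlen, hzero, hm⟩ := hinv
  have hpos : (0:Nat) < 2 ^ jobs.length := by positivity
  rw [hval]
  by_cases hk : k ≤ 1
  · -- both sides are the plain sum of the jobs
    rw [lc_1723_alt, if_pos hk]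
    have hT : (k - 1).toNat = 0 := by omega
    rw [hT] at hm
    by_cases hn : jobs.length = 0
    · have hj : jobs = [] := List.length_eq_zero_iff.mp hn
      subst hj
      simpa using hzero
    · have hfull0 : 2 ^ jobs.length - 1 ≠ 0 := by
        have : (2:Nat) ^ 1 ≤ 2 ^ jobs.length := Nat.pow_le_pow_right (by omega) (by omega)
        simp at this
        omega
      obtain ⟨hiff, _⟩ := hm (2 ^ jobs.length - 1) (by omega) hfull0
      have h1 : pre.getD (2 ^ jobs.length - 1) 0 ≤ bitsSum jobs (2 ^ jobs.length - 1) :=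
        (hiff _).mpr ((pv_W_one hfull0).mpr (le_refl _))
      have h2 : bitsSum jobs (2 ^ jobs.length - 1) ≤ pre.getD (2 ^ jobs.length - 1) 0 :=
        (pv_W_one hfull0).mp ((hiff _).mp (le_refl _))
      rw [← pv_bitsSum_full jobs]
      omega
  · -- k ≥ 2 : B's binary search over the distinct subset costs
    rw [lc_1723_alt, if_neg hk]
    simp only [Nat.one_shiftLeft]
    rw [pv_costB_spec jobs]
    have hcg : ∀ m, m < 2 ^ jobs.length →
        ((List.range (2 ^ jobs.length)).map (fun m => bitsSum jobs m)).getD m 0 = bitsSum jobs m :=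
      fun m hm2 => pv_getD_map_range _ _ _ hm2
    have hmemc : ∀ x : Int, x ∈ PySem.List.sorted
        (PySem.Set.ofList ((List.range (2 ^ jobs.length)).map (fun m => bitsSum jobs m))) (fun y => y) ↔
        ∃ u, u < 2 ^ jobs.length ∧ x = bitsSum jobs u := by
      intro x
      rw [PySem.List.mem_sorted, PySem.Set.mem_ofList, List.mem_map]
      constructor
      · rintro ⟨u, hu, rfl⟩
        exact ⟨u, List.mem_range.mp hu, rfl⟩
      · rintro ⟨u, hu, rfl⟩
        exact ⟨u, List.mem_range.mpr hu, rfl⟩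
    set cand := PySem.List.sorted
      (PySem.Set.ofList ((List.range (2 ^ jobs.length)).map (fun m => bitsSum jobs m))) (fun y => y)
      with hcand
    have hpair : cand.Pairwise (· ≤ ·) := PySem.List.sorted_pairwise _ _
    have hnodup : cand.Nodup :=
      List.Perm.nodup (PySem.List.sorted_perm _ (fun y => y) false).symm (PySem.Set.nodup_ofList _)
    by_cases hn : jobs.length = 0
    · -- empty job list: both sides are 0
      have hj : jobs = [] := List.length_eq_zero_iff.mp hn
      subst hj
      have hc0 : cand = [0] := by
        rw [hcand]
        decide
      rw [hc0]
      rw [lc1723AltSearch]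
      norm_num
      simpa using hzero
    · have hfull0 : 2 ^ jobs.length - 1 ≠ 0 := by
        have : (2:Nat) ^ 1 ≤ 2 ^ jobs.length := Nat.pow_le_pow_right (by omega) (by omega)
        simp at this
        omega
      obtain ⟨hiff, u, hu, hvu⟩ := hm (2 ^ jobs.length - 1) (by omega) hfull0
      have htn : (k - 1).toNat + 1 = k.toNat := by omega
      rw [htn] at hiff
      have hF : ∀ c : Int,
          ((match lc1723AltWorkers ((List.range (2 ^ jobs.length)).map (fun m => bitsSum jobs m))
              (2 ^ jobs.length - 1) c with
            | none => false
            | some v => decide (v ≤ k)) = true) ↔ pre.getD (2 ^ jobs.length - 1) 0 ≤ c := by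
        intro c
        have h1 := pv_workers_spec jobs c _ hcg k
        have h2 : (match lc1723AltWorkers ((List.range (2 ^ jobs.length)).map (fun m => bitsSum jobs m))
              (2 ^ jobs.length - 1) c with
            | none => false
            | some v => decide (v ≤ k)) = true ↔
            oLE (lc1723AltWorkers ((List.range (2 ^ jobs.length)).map (fun m => bitsSum jobs m))
              (2 ^ jobs.length - 1) c) k := by
          cases hw : lc1723AltWorkers ((List.range (2 ^ jobs.length)).map (fun m => bitsSum jobs m))
              (2 ^ jobs.length - 1) c with
          | none =>
            simp only [oLE]
            constructor
            · intro h3; cases h3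
            · rintro ⟨v, hv, _⟩; cases hv
          | some w =>
            simp only [oLE, decide_eq_true_eq]
            constructor
            · intro h3; exact ⟨w, rfl, h3⟩
            · rintro ⟨v, hv, h4⟩; injection hv with h5; omega
        rw [h2, h1]
        constructor
        · rintro ⟨tn, htle, hw⟩
          apply (hiff c).mpr
          exact pv_W_mono_t jobs c (by omega : tn ≤ k.toNat) hw
        · intro h3
          exact ⟨k.toNat, by omega, (hiff c).mp h3⟩
      have hvc : pre.getD (2 ^ jobs.length - 1) 0 ∈ cand := (hmemc _).mpr ⟨u, hu, hvu⟩
      obtain ⟨j, hjlt, hjget⟩ := List.mem_iff_getElem.mp hvc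
      have hmono := List.pairwise_iff_getElem.mp hpair
      have hans : ∀ idx, idx < cand.length →
          ((match lc1723AltWorkers ((List.range (2 ^ jobs.length)).map (fun m => bitsSum jobs m))
              (2 ^ jobs.length - 1) (cand.getD idx 0) with
            | none => false
            | some v => decide (v ≤ k)) = true ↔ j ≤ idx) := by
        intro idx hidx
        rw [hF, List.getD_eq_getElem _ _ hidx]
        constructor
        · intro h3
          by_contra hc
          have hlt : idx < j := by omega
          have h4 : cand[idx] ≤ cand[j] := by
            rcases eq_or_lt_of_le (le_of_lt hlt) with h5 | h5
            · omega
            · exact hmono idx j hidx hjlt hlt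
          have h5 : cand[idx] = cand[j] := by rw [hjget] at h4 ⊢; omega
          have := (List.Nodup.getElem_inj_iff hnodup).mp h5
          omega
        · intro h3
          rcases eq_or_lt_of_le h3 with h4 | h4
          · subst h4
            rw [hjget]
          · rw [← hjget]
            exact hmono j idx hjlt hidx h4
      rw [pv_search_spec _ cand j hans cand.length 0 (cand.length - 1) (by omega)
        (by omega) (by omega) (by omega)]
      rw [List.getD_eq_getElem _ _ hjlt, hjget]

-- ===== VERDICT (by name: the statement is the Claim_ definition above) =====
theorem lc_1723_spec : Claim_equal_lc_1723 := by
  intro jobs k _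
  unfold Spec_lc_1723
  exact pv_main jobs k
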